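-- pv_equiv track=rewrite | github.com/jorgesmu/algorithm_exercises | bits/rotate_bits.py | rotate_iterative
-- ===== SOURCE A (Python) =====
-- def rotate_iterative(num, rotations):
-- 	word_size = 4
-- 	mask = (1 << word_size) - 1
-- 	while rotations > 0:
-- 		activated_bit = ((1 << (word_size-1)) & num) > 0
-- 		num = ((num << 1) & mask) + activated_bit
-- 		rotations -= 1
-- 	return num
-- ===== SOURCE B (Python) =====
-- def rotate_iterative(num, rotations):
-- 	if rotations <= 0:
-- 		return num
-- 	# one unmasked step brings the value into the 4-bit range
-- 	m = ((num << 1) & 15) | ((num >> 3) & 1)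
-- 	# remaining rotations collapse modulo the word size
-- 	k = (rotations - 1) % 4
-- 	return ((m << k) | (m >> (4 - k))) & 15
-- ===== Notes on version B (the rewrite author's own statement) =====
-- stated objective: faster
-- what changed: A rotates one bit at a time in a loop over all `rotations` iterations; B performs one unmasked step to land in the 4-bit range and then applies a single closed-form rotation by (rotations-1) mod 4, removing the loop entirely.
import Mathlib
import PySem

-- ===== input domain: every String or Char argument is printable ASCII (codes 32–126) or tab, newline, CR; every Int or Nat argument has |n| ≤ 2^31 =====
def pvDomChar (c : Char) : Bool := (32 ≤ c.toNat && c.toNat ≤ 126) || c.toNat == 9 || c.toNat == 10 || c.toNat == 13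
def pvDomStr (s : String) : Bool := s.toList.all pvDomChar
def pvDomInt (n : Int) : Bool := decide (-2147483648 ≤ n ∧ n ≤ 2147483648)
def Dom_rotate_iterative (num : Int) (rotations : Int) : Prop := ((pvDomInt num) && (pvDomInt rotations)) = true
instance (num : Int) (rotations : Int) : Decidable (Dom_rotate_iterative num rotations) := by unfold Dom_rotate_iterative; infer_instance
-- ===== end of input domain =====

-- B replaces A's O(rotations) bit-shuffling loop by one unmasked step followed by a
-- closed-form 4-bit rotation of the remaining count taken mod 4 (O(1)).

-- ===== PORT A =====
-- Python's `while rotations > 0` as recursion on rotations; word_size = 4,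
-- mask = (1 << word_size) - 1; shift counts are Nat literals (Python shifts by nonnegative ints here).
def rotate_iterative (num : Int) (rotations : Int) : Int :=
  if h : 0 < rotations then
    rotate_iterative
      (PySem.Int.band (num <<< (1 : Nat)) (((1 : Int) <<< (4 : Nat)) - 1) +
        (if 0 < PySem.Int.band ((1 : Int) <<< (4 - 1 : Nat)) num then 1 else 0))
      (rotations - 1)
  else num
termination_by rotations.toNat
decreasing_by omega

-- ===== PORT B =====
-- literal transliteration of Source B; k = (rotations-1) % 4 satisfies 0 ≤ k ≤ 3,
-- so `.toNat` on the two shift counts is exact.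
def rotate_iterative_alt (num : Int) (rotations : Int) : Int :=
  if rotations ≤ 0 then
    num
  else
    let m := PySem.Int.bor (PySem.Int.band (num <<< (1 : Nat)) 15)
                           (PySem.Int.band (num >>> (3 : Nat)) 1)
    let k := PySem.Int.mod (rotations - 1) 4
    PySem.Int.band (PySem.Int.bor (m <<< k.toNat) (m >>> (4 - k).toNat)) 15

-- ===== PRECONDITION & SPEC =====
def Spec_rotate_iterative (num : Int) (rotations : Int) (out : Int) : Prop := out = rotate_iterative_alt num rotations
instance (num : Int) (rotations : Int) (out : Int) : Decidable (Spec_rotate_iterative num rotations out) := by unfold Spec_rotate_iterative; infer_instance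

-- ===== CLAIM (what is proved, stated in full; the proofs are below) =====
def Claim_equal_rotate_iterative : Prop := ∀ (num : Int) (rotations : Int), Dom_rotate_iterative num rotations → Spec_rotate_iterative num rotations (rotate_iterative num rotations)

-- ===== LEMMAS AND PROOFS =====

-- closed-form single left rotation of the low 4 bits (proof-side helper)
def pvRot1 (x : Int) : Int := if 8 ≤ x % 16 then 2 * (x % 16) - 15 else 2 * (x % 16)

-- A's loop, fuel form (proof-side helper)
def pvLoop : Int → Nat → Int
  | x, 0 => x
  | x, n + 1 => pvLoop (pvRot1 x) n

lemma pv_band15 (a : Int) : PySem.Int.band a 15 = a % 16 := by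
  unfold PySem.Int.band
  have key : ∀ m : Nat, m &&& 15 = m % 16 := by
    intro m
    have h := Nat.and_two_pow_sub_one_eq_mod m 4
    norm_num at h
    exact h
  split
  · rw [if_pos (by norm_num), show (15 : Int).toNat = 15 from rfl, key]
    omega
  · rw [if_pos (by norm_num), show (15 : Int).toNat = 15 from rfl, Nat.and_comm, key]
    omega

lemma pv_band8 (a : Int) : PySem.Int.band 8 a = if 8 ≤ a % 16 then 8 else 0 := by
  unfold PySem.Int.band
  have key : ∀ m : Nat, 8 &&& m = (if 8 ≤ m % 16 then 8 else 0) := by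
    intro m
    have h := Nat.and_two_pow m 3
    rw [Nat.and_comm] at h
    norm_num [Nat.testBit, Nat.shiftRight_eq_div_pow] at h
    rw [h]
    rcases Nat.mod_two_eq_zero_or_one (m / 8) with h2 | h2 <;> simp [h2] <;> omega
  rw [if_pos (by norm_num), show (8 : Int).toNat = 8 from rfl]
  split
  · rw [key]; split <;> split <;> omega
  · rw [key]; split <;> split <;> omega

lemma pv_stepA_eq (num : Int) :
    PySem.Int.band (num <<< (1 : Nat)) (((1 : Int) <<< (4 : Nat)) - 1) +
      (if 0 < PySem.Int.band ((1 : Int) <<< (4 - 1 : Nat)) num then 1 else 0) = pvRot1 num := by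
  rw [show ((1 : Int) <<< (4 : Nat)) - 1 = 15 from rfl,
      show ((1 : Int) <<< (4 - 1 : Nat)) = 8 from rfl,
      pv_band15, pv_band8, Int.shiftLeft_eq]
  unfold pvRot1
  split_ifs <;> omega

lemma pv_bor_small (x y : Int) (hx : 0 ≤ x) (hx2 : x < 16) (hpar : x % 2 = 0)
    (hy : y = 0 ∨ y = 1) : PySem.Int.bor x y = x + y := by
  have hx' : x = 0 ∨ x = 2 ∨ x = 4 ∨ x = 6 ∨ x = 8 ∨ x = 10 ∨ x = 12 ∨ x = 14 := by omega
  rcases hy with hy | hy <;> subst hy <;>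
    rcases hx' with h | h | h | h | h | h | h | h <;> subst h <;> decide

lemma pv_stepB_eq (num : Int) :
    PySem.Int.bor (PySem.Int.band (num <<< (1 : Nat)) 15)
      (PySem.Int.band (num >>> (3 : Nat)) 1) = pvRot1 num := by
  rw [pv_band15, PySem.Int.band_one, PySem.Int.mod_eq_emod_of_pos (by norm_num),
      Int.shiftLeft_eq, Int.shiftRight_eq_div_pow]
  norm_num
  rw [pv_bor_small _ _ (by omega) (by omega) (by omega) (by omega)]
  unfold pvRot1
  split_ifs <;> omega

lemma pvRot1_mem (x : Int) : 0 ≤ pvRot1 x ∧ pvRot1 x < 16 := by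
  unfold pvRot1; split <;> omega

lemma pvRot1_four (x : Int) (hx : 0 ≤ x) (hx2 : x < 16) :
    pvRot1 (pvRot1 (pvRot1 (pvRot1 x))) = x := by
  interval_cases x <;> decide

lemma pv_bridge : ∀ (n : Nat) (x r : Int), r.toNat = n → rotate_iterative x r = pvLoop x n := by
  intro n
  induction n with
  | zero =>
    intro x r h
    rw [rotate_iterative, dif_neg (by omega)]
    rfl
  | succ n IH =>
    intro x r h
    rw [rotate_iterative, dif_pos (by omega), pv_stepA_eq]
    exact IH (pvRot1 x) (r - 1) (by omega)

lemma pvLoop_add_four (x : Int) (hx : 0 ≤ x) (hx2 : x < 16) (n : Nat) :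
    pvLoop x (n + 4) = pvLoop x n := by
  have h : n + 4 = n + 1 + 1 + 1 + 1 := by omega
  rw [h]
  show pvLoop (pvRot1 (pvRot1 (pvRot1 (pvRot1 x)))) n = pvLoop x n
  rw [pvRot1_four x hx hx2]

lemma pvLoop_mod (n : Nat) (x : Int) (hx : 0 ≤ x) (hx2 : x < 16) :
    pvLoop x n = pvLoop x (n % 4) := by
  induction n using Nat.strong_induction_on with
  | _ n IH =>
    by_cases h : n < 4
    · rw [Nat.mod_eq_of_lt h]
    · have h4 : n - 4 + 4 = n := by omega
      rw [← h4, pvLoop_add_four x hx hx2, IH (n - 4) (by omega)]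
      congr 1
      omega

lemma pv_small (x : Int) (hx : 0 ≤ x) (hx2 : x < 16) (j : Nat) (hj : j < 4) :
    PySem.Int.band (PySem.Int.bor (x <<< j) (x >>> (4 - j))) 15 = pvLoop x j := by
  interval_cases j <;> interval_cases x <;> decide

-- ===== VERDICT (by name: the statement is the Claim_ definition above) =====
theorem rotate_iterative_spec : Claim_equal_rotate_iterative := by
  intro num rotations _
  unfold Spec_rotate_iterative
  simp only [rotate_iterative_alt]
  by_cases hr : rotations ≤ 0
  · rw [rotate_iterative, dif_neg (by omega), if_pos hr]
  · rw [if_neg hr]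
    have hpos : 0 < rotations := by omega
    have hb := pv_bridge rotations.toNat num rotations rfl
    have hn : rotations.toNat = (rotations.toNat - 1) + 1 := by omega
    rw [hb, hn]
    show pvLoop (pvRot1 num) (rotations.toNat - 1) = _
    set x := pvRot1 num with hxdef
    have hx := pvRot1_mem num
    rw [pvLoop_mod _ x hx.1 hx.2, pv_stepB_eq]
    have hkmod : PySem.Int.mod (rotations - 1) 4 = (rotations - 1) % 4 :=
      PySem.Int.mod_eq_emod_of_pos (by norm_num)
    have hk1 : (PySem.Int.mod (rotations - 1) 4).toNat = (rotations.toNat - 1) % 4 := by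
      rw [hkmod]; omega
    have hk2 : (4 - PySem.Int.mod (rotations - 1) 4).toNat = 4 - (rotations.toNat - 1) % 4 := by
      rw [hkmod]; omega
    rw [hk1, hk2, pv_small x hx.1 hx.2 _ (by omega)]
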